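-- pv_equiv track=rewrite | github.com/polito-informatica/Esempi-esame | esami/murphy/murphy.py | ricerca
-- ===== SOURCE A (Python) =====
-- def ricerca(massime, parole):
--     rilevanti = []
--     for massima in massime:
--         lista_parole = massima['enunciato'].split()  # separa le parole in corrispondenza degli spazi
--         for i in range(len(lista_parole)):
--             lista_parole[i] = lista_parole[i].strip(',.;:\'\"()').lower()
--
--         if set(parole).intersection(lista_parole) != set():
--             rilevanti.append(massima)
--
--     return rilevanti
-- ===== SOURCE B (Python) =====
-- def ricerca(massime, parole):
--     # Inverted index: normalized word -> set of maxim indices containing it.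
--     index = {}
--     for i, massima in enumerate(massime):
--         for w in massima['enunciato'].split():
--             k = w.strip(',.;:\'\"()').lower()
--             index[k] = index.get(k, set()) | {i}
--     matched = set()
--     for p in parole:
--         matched = matched | index.get(p, set())
--     out = []
--     for i, massima in enumerate(massime):
--         if i in matched:
--             out.append(massima)
--     return out
-- ===== Notes on version B (the rewrite author's own statement) =====
-- stated objective: alternative
-- what changed: Replaces the per-maxim set-intersection test with a two-phase inverted index (normalized word -> set of maxim indices) built in one pass, whose per-query-word lookups are unioned and the maxims re-emitted by index in original order.
import Mathlib
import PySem

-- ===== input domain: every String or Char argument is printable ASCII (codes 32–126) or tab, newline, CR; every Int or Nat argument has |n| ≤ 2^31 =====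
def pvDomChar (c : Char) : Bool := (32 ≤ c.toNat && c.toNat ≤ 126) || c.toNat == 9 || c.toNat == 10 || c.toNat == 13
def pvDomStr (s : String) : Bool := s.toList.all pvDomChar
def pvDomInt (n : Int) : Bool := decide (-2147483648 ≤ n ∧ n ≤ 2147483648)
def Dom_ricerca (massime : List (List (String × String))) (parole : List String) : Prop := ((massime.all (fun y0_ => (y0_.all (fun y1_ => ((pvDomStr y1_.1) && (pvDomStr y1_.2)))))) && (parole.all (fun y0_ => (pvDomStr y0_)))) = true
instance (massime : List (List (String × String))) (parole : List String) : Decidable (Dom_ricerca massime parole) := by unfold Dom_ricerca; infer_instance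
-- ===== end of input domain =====

-- B replaces A's per-maxim intersection test by an inverted index (word -> set of maxim indices); equal return values, no speed claim.

-- shared normalizer: w.strip(',.;:\'\"()').lower()  (identical expression in both Pythons)
def pvNorm (w : String) : String :=
  PySem.Str.lower (PySem.Str.stripChars w ",.;:'\"()")

-- ===== PORT A =====
def ricerca (massime : List (List (String × String))) (parole : List String) : List (List (String × String)) :=
  massime.foldl (fun rilevanti massima =>
    let lista0 := PySem.Str.split₀ ((PySem.Dict.get? (PySem.Dict.mk massima) "enunciato").getD "")  -- KeyError (= none) excluded by Pre_
    let lista := (PySem.List.pyRange 0 (lista0.length : Int) 1).foldl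
      (fun l i => PySem.List.pySetD l i (pvNorm (PySem.List.pyGetD l i ""))) lista0
    if PySem.Set.equal (PySem.Set.inter (PySem.Set.ofList parole) lista) PySem.Set.empty then rilevanti
    else rilevanti ++ [massima]) []

-- ===== PORT B =====
def ricerca_alt (massime : List (List (String × String))) (parole : List String) : List (List (String × String)) :=
  let index : PySem.Dict String (PySem.Set Int) :=
    (PySem.List.enumerate massime 0).foldl (fun d p =>
      (PySem.Str.split₀ ((PySem.Dict.get? (PySem.Dict.mk p.2) "enunciato").getD "")).foldl
        (fun d w =>
          let k := pvNorm w
          PySem.Dict.insert d k (PySem.Set.union (PySem.Dict.getD d k PySem.Set.empty) [p.1])) d)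
      PySem.Dict.empty
  let matched : PySem.Set Int :=
    parole.foldl (fun s p => PySem.Set.union s (PySem.Dict.getD index p PySem.Set.empty)) PySem.Set.empty
  (PySem.List.enumerate massime 0).foldl
    (fun out p => if PySem.Set.contains matched p.1 then out ++ [p.2] else out) []

-- ===== PRECONDITION & SPEC =====
-- Pre_ excludes exactly the maxims missing the 'enunciato' key, on which Python A raises KeyError.
def Pre_ricerca (massime : List (List (String × String))) (parole : List String) : Prop :=
  massime.all (fun m => PySem.Dict.contains (PySem.Dict.mk m) "enunciato") = true
instance (massime : List (List (String × String))) (parole : List String) : Decidable (Pre_ricerca massime parole) := by unfold Pre_ricerca; infer_instance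
def pvWitness_ricerca : (List (List (String × String))) × List String :=
  ([[("enunciato", "Ciao, mondo!")], [("enunciato", "altro testo")]], ["ciao"])

def Spec_ricerca (massime : List (List (String × String))) (parole : List String) (out : List (List (String × String))) : Prop := out = ricerca_alt massime parole
instance (massime : List (List (String × String))) (parole : List String) (out : List (List (String × String))) : Decidable (Spec_ricerca massime parole out) := by unfold Spec_ricerca; infer_instance

-- ===== CLAIM (what is proved, stated in full; the proofs are below) =====
def Claim_equal_ricerca : Prop := ∀ (massime : List (List (String × String))) (parole : List String), Dom_ricerca massime parole → Pre_ricerca massime parole → Spec_ricerca massime parole (ricerca massime parole)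

-- ===== LEMMAS AND PROOFS =====

-- normalized words of a maxim
def pvWords (m : List (String × String)) : List String :=
  (PySem.Str.split₀ ((PySem.Dict.get? (PySem.Dict.mk m) "enunciato").getD "")).map pvNorm

-- A's in-place normalization loop is map pvNorm
theorem pvMapInPlace (todo done : List String) :
    (PySem.List.pyRange (done.length : Int) ((done.length + todo.length : Nat) : Int) 1).foldl
      (fun l i => PySem.List.pySetD l i (pvNorm (PySem.List.pyGetD l i ""))) (done ++ todo)
    = done ++ todo.map pvNorm := by
  induction todo generalizing done with
  | nil => simp [PySem.List.pyRange]
  | cons x xs ih =>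
    have hlt : (done.length : Int) < ((done.length + (x :: xs).length : Nat) : Int) := by
      simp
    rw [PySem.List.pyRange_one_cons hlt]
    have hget : PySem.List.pyGetD (done ++ x :: xs) (done.length : Int) "" = x := by
      simp [PySem.List.pyGetD_natCast, List.getD]
    have hset : PySem.List.pySetD (done ++ x :: xs) (done.length : Int) (pvNorm x)
        = (done ++ [pvNorm x]) ++ xs := by
      simp [PySem.List.pySetD_natCast]
    simp only [List.foldl_cons, hget, hset]
    have harith : ((done.length + (x :: xs).length : Nat) : Int)
        = (((done ++ [pvNorm x]).length + xs.length : Nat) : Int) := by simp; omega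
    have hstart : (done.length : Int) + 1 = ((done ++ [pvNorm x]).length : Int) := by simp
    rw [harith, hstart, ih (done ++ [pvNorm x])]
    simp

-- the inner word loop of B's index construction
theorem pvInner (ws : List String) (d : PySem.Dict String (PySem.Set Int)) (w : String) (x j : Int) :
    x ∈ (ws.foldl (fun d w' =>
        PySem.Dict.insert d (pvNorm w') (PySem.Set.union (PySem.Dict.getD d (pvNorm w') PySem.Set.empty) [j])) d).getD w PySem.Set.empty
    ↔ x ∈ d.getD w PySem.Set.empty ∨ (x = j ∧ w ∈ ws.map pvNorm) := by
  induction ws generalizing d with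
  | nil => simp
  | cons a as ih =>
    simp only [List.foldl_cons, List.map_cons, List.mem_cons]
    rw [ih]
    rw [PySem.Dict.getD_insert]
    by_cases hw : w = pvNorm a
    · subst hw
      simp [PySem.Set.mem_union]
      tauto
    · simp [hw]

-- the full index: membership characterization
theorem pvIndexMem (ms : List (List (String × String))) (s : Int) (d : PySem.Dict String (PySem.Set Int)) (w : String) (x : Int) :
    x ∈ ((PySem.List.enumerate ms s).foldl (fun d p =>
      (PySem.Str.split₀ ((PySem.Dict.get? (PySem.Dict.mk p.2) "enunciato").getD "")).foldl
        (fun d w' =>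
          PySem.Dict.insert d (pvNorm w') (PySem.Set.union (PySem.Dict.getD d (pvNorm w') PySem.Set.empty) [p.1])) d) d).getD w PySem.Set.empty
    ↔ x ∈ d.getD w PySem.Set.empty ∨ ∃ k : Nat, ∃ _ : k < ms.length, x = s + k ∧ w ∈ pvWords ms[k] := by
  induction ms generalizing s d with
  | nil => simp [PySem.List.enumerate_nil]
  | cons m ms ih =>
    rw [PySem.List.enumerate_cons]
    simp only [List.foldl_cons]
    rw [ih, pvInner]
    constructor
    · rintro ((h | ⟨rfl, hw⟩) | ⟨k, hk, rfl, hw⟩)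
      · exact Or.inl h
      · exact Or.inr ⟨0, by simp, by simp, by simpa [pvWords] using hw⟩
      · refine Or.inr ⟨k + 1, by simpa using hk, by push_cast; ring, by simpa using hw⟩
    · rintro (h | ⟨k, hk, rfl, hw⟩)
      · exact Or.inl (Or.inl h)
      · match k, hk, hw with
        | 0, hk, hw => exact Or.inl (Or.inr ⟨by simp, by simpa [pvWords] using hw⟩)
        | k + 1, hk, hw =>
          exact Or.inr ⟨k, by simpa using hk, by push_cast; ring, by simpa using hw⟩


-- A's append-on-false loop is a filter
theorem pvFiltA {α : Type} (c : α → Bool) (ms : List α) (acc : List α) :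
    ms.foldl (fun r m => if c m then r else r ++ [m]) acc = acc ++ ms.filter (fun m => !c m) := by
  induction ms generalizing acc with
  | nil => simp
  | cons m ms ih =>
    by_cases h : c m <;> simp [List.foldl_cons, h, ih]

-- B's re-emission loop is a filter when the index test agrees with a per-element predicate
theorem pvEmit {α : Type} (f : Int → Bool) (g : α → Bool) (ms : List α) (s : Int) (acc : List α)
    (h : ∀ k : Nat, ∀ _ : k < ms.length, f (s + k) = g ms[k]) :
    (PySem.List.enumerate ms s).foldl (fun out p => if f p.1 then out ++ [p.2] else out) acc
    = acc ++ ms.filter g := by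
  induction ms generalizing s acc with
  | nil => simp [PySem.List.enumerate_nil]
  | cons m ms ih =>
    rw [PySem.List.enumerate_cons]
    simp only [List.foldl_cons]
    have h0 : f s = g m := by simpa using h 0 (by simp)
    have ht : ∀ k : Nat, ∀ _ : k < ms.length, f ((s + 1) + k) = g ms[k] := by
      intro k hk
      have := h (k + 1) (by simpa using hk)
      push_cast at this ⊢
      rw [show s + 1 + (k : Int) = s + ((k : Int) + 1) by ring]
      simpa using this
    by_cases hm : g m <;> simp only [h0, hm, if_true, if_false] <;>
      rw [ih _ _ ht] <;> simp [hm]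

-- the union loop over parole: membership
theorem pvMatchedMem (ps : List String) (idx : PySem.Dict String (PySem.Set Int))
    (s0 : PySem.Set Int) (x : Int) :
    x ∈ ps.foldl (fun s p => PySem.Set.union s (PySem.Dict.getD idx p PySem.Set.empty)) s0
    ↔ x ∈ s0 ∨ ∃ p ∈ ps, x ∈ PySem.Dict.getD idx p PySem.Set.empty := by
  induction ps generalizing s0 with
  | nil => simp
  | cons p ps ih =>
    simp only [List.foldl_cons]
    rw [ih]
    rw [PySem.Set.mem_union]
    simp only [List.mem_cons]
    constructor
    · rintro ((h | h) | ⟨q, hq, h⟩)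
      · exact Or.inl h
      · exact Or.inr ⟨p, Or.inl rfl, h⟩
      · exact Or.inr ⟨q, Or.inr hq, h⟩
    · rintro (h | ⟨q, (rfl | hq), h⟩)
      · exact Or.inl (Or.inl h)
      · exact Or.inl (Or.inr h)
      · exact Or.inr ⟨q, hq, h⟩

-- A's emptiness test, characterized
theorem pvCond (parole ws : List String) :
    (!PySem.Set.equal (PySem.Set.inter (PySem.Set.ofList parole) ws) PySem.Set.empty) = true
    ↔ ∃ p ∈ parole, p ∈ ws := by
  rw [Bool.not_eq_eq_eq_not, Bool.not_true, ← Bool.not_eq_true, PySem.Set.equal_iff]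
  simp only [PySem.Set.mem_inter, PySem.Set.mem_ofList, PySem.Set.empty]
  constructor
  · intro h
    by_contra hc
    push_neg at hc
    exact h (fun x => by simp; intro hx; exact hc x hx)
  · rintro ⟨p, hp, hw⟩ h
    have := (h p).1 ⟨hp, hw⟩
    simp at this

-- ===== VERDICT (by name: the statement is the Claim_ definition above) =====
theorem ricerca_spec : Claim_equal_ricerca := by
  intro massime parole _hdom _hpre
  unfold Spec_ricerca ricerca ricerca_alt
  -- normalize A's in-place loop to a map
  have hA : ∀ m : List (String × String),
      (PySem.List.pyRange 0 ((PySem.Str.split₀ ((PySem.Dict.get? (PySem.Dict.mk m) "enunciato").getD "")).length : Int) 1).foldl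
        (fun l i => PySem.List.pySetD l i (pvNorm (PySem.List.pyGetD l i "")))
        (PySem.Str.split₀ ((PySem.Dict.get? (PySem.Dict.mk m) "enunciato").getD ""))
      = pvWords m := by
    intro m
    have := pvMapInPlace (PySem.Str.split₀ ((PySem.Dict.get? (PySem.Dict.mk m) "enunciato").getD "")) []
    simpa [pvWords] using this
  simp only [hA]
  rw [pvFiltA (fun m => PySem.Set.equal (PySem.Set.inter (PySem.Set.ofList parole) (pvWords m)) PySem.Set.empty) massime []]
  rw [pvEmit _ (fun m => !PySem.Set.equal (PySem.Set.inter (PySem.Set.ofList parole) (pvWords m)) PySem.Set.empty) massime 0 []]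
  intro k hk
  rw [Bool.eq_iff_iff, PySem.Set.contains_iff, pvMatchedMem, pvCond]
  simp only [pvIndexMem]
  simp only [PySem.Dict.getD_empty, PySem.Set.empty, List.not_mem_nil, false_or]
  constructor
  · rintro ⟨p, hp, k', hk', heq, hw⟩
    have : k' = k := by omega
    subst this
    exact ⟨p, hp, hw⟩
  · rintro ⟨p, hp, hw⟩
    exact ⟨p, hp, k, hk, rfl, hw⟩
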